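-- pv_equiv track=rewrite | github.com/syseitz/predTED | utils/features.py | get_loop_sizes
-- ===== SOURCE A (Python) =====
-- from typing import List, Tuple, Dict
--
-- def get_loop_sizes(structure:str)->List[int]:
--     sizes=[]; curr=0
--     for c in structure:
--         if c=='.': curr+=1
--         else:
--             if curr>0: sizes.append(curr); curr=0
--     if curr>0: sizes.append(curr)
--     return sizes
-- ===== SOURCE B (Python) =====
-- from typing import List
--
-- def get_loop_sizes(structure: str) -> List[int]:
--     n = len(structure)
--     starts = [i for i in range(n)
--               if structure[i] == '.' and (i == 0 or structure[i - 1] != '.')]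
--     ends = [i for i in range(n)
--             if structure[i] == '.' and (i == n - 1 or structure[i + 1] != '.')]
--     return [e - b + 1 for b, e in zip(starts, ends)]
-- ===== Notes on version B (the rewrite author's own statement) =====
-- stated objective: alternative
-- what changed: Replaces the single-pass running-counter state machine with boundary detection: two index scans collect the run-start and run-end positions of dot runs, which are zipped and subtracted (end - start + 1) to give the lengths.
import Mathlib
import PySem

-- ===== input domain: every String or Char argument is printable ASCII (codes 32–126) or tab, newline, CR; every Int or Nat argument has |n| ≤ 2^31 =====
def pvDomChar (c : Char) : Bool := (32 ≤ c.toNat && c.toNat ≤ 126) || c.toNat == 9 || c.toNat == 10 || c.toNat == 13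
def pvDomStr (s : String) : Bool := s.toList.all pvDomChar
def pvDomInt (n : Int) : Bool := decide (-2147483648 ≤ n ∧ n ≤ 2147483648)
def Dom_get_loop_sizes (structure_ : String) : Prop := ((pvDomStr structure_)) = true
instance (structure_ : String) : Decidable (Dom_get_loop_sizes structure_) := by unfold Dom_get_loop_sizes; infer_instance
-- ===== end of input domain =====

-- B replaces A's running-counter state machine with boundary detection: collect run-start
-- and run-end indices of dot runs, zip them and take end - start + 1; same behaviour.

-- ===== PORT A =====
-- A's loop body and trailing flush, as named helpers; state (sizes, curr)
def pvStep (p : List Int × Int) (c : Char) : List Int × Int :=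
  if c == '.' then (p.1, p.2 + 1)
  else if p.2 > 0 then (p.1 ++ [p.2], 0) else (p.1, p.2)

def pvFin (p : List Int × Int) : List Int :=
  if p.2 > 0 then p.1 ++ [p.2] else p.1

def get_loop_sizes (structure_ : String) : List Int :=
  pvFin (structure_.toList.foldl pvStep ([], 0))

-- ===== PORT B =====
-- indices in B are always in range (0 ≤ i < n, and i-1 / i+1 only consulted behind the
-- short-circuit guards, like Python's `or`), so List.getD is exact here
def get_loop_sizes_alt (structure_ : String) : List Int :=
  let l := structure_.toList
  let n := l.length
  let starts := (List.range n).filter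
    (fun i => l.getD i ' ' == '.' && (i == 0 || !(l.getD (i - 1) ' ' == '.')))
  let ends := (List.range n).filter
    (fun i => l.getD i ' ' == '.' && (i == n - 1 || !(l.getD (i + 1) ' ' == '.')))
  (starts.zip ends).map (fun p => (p.2 : Int) - (p.1 : Int) + 1)

-- ===== PRECONDITION & SPEC =====
def Spec_get_loop_sizes (structure_ : String) (out : List Int) : Prop := out = get_loop_sizes_alt structure_
instance (structure_ : String) (out : List Int) : Decidable (Spec_get_loop_sizes structure_ out) := by unfold Spec_get_loop_sizes; infer_instance

-- ===== CLAIM (what is proved, stated in full; the proofs are below) =====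
def Claim_equal_get_loop_sizes : Prop := ∀ (structure_ : String), Dom_get_loop_sizes structure_ → Spec_get_loop_sizes structure_ (get_loop_sizes structure_)

-- ===== LEMMAS AND PROOFS =====

-- run-start indices, with the character preceding the list as a parameter
def pvSP (prev : Char) (l : List Char) : List Nat :=
  (List.range l.length).filter
    (fun i => l.getD i ' ' == '.' &&
      (if i = 0 then !(prev == '.') else !(l.getD (i - 1) ' ' == '.')))

-- run-end indices (out of range getD gives ' ' ≠ '.', so no n-1 guard is needed)
def pvE (l : List Char) : List Nat :=
  (List.range l.length).filter
    (fun i => l.getD i ' ' == '.' && !(l.getD (i + 1) ' ' == '.'))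

-- zip starts/ends and take lengths
def pvZ (S E : List Nat) : List Int :=
  (S.zip E).map (fun p => (p.2 : Int) - (p.1 : Int) + 1)

def pvR (l : List Char) : List Int := pvZ (pvSP ' ' l) (pvE l)

theorem pvZ_shift (k : Nat) : ∀ S E : List Nat,
    pvZ (S.map (· + k)) (E.map (· + k)) = pvZ S E
  | [], E => by simp [pvZ]
  | s :: S, [] => by simp [pvZ]
  | s :: S, e :: E => by
    have ih := pvZ_shift k S E
    simp only [pvZ, List.map_cons, List.zip_cons_cons] at *
    rw [ih]
    congr 1
    push_cast
    ring

theorem pv_filter_range_succ (n : Nat) (p : Nat → Bool) :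
    (List.range (n + 1)).filter p =
      (if p 0 then [0] else []) ++ ((List.range n).filter (fun j => p (j + 1))).map (· + 1) := by
  rw [List.range_succ_eq_map, List.filter_cons]
  have h : (List.map Nat.succ (List.range n)).filter p
      = ((List.range n).filter (fun j => p (j + 1))).map (· + 1) := by
    rw [List.filter_map]
    rfl
  by_cases hp : p 0 <;> simp [hp, h]

theorem pvSP_cons (prev c : Char) (l : List Char) :
    pvSP prev (c :: l) =
      (if c == '.' && !(prev == '.') then [0] else []) ++ (pvSP c l).map (· + 1) := by
  unfold pvSP
  rw [show (c :: l).length = l.length + 1 from rfl, pv_filter_range_succ]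
  congr 1
  refine congrArg _ (List.filter_congr ?_)
  intro j _
  cases j with
  | zero => simp
  | succ k => simp

theorem pvE_cons (c : Char) (l : List Char) :
    pvE (c :: l) =
      (if c == '.' && !(l.getD 0 ' ' == '.') then [0] else []) ++ (pvE l).map (· + 1) := by
  unfold pvE
  rw [show (c :: l).length = l.length + 1 from rfl, pv_filter_range_succ]
  congr 1

-- the prev parameter only matters through whether prev is a dot
theorem pvSP_nondot (c : Char) (hc : ¬ c = '.') (l : List Char) :
    pvSP c l = pvSP ' ' l := by
  unfold pvSP
  congr 1
  funext i
  by_cases h : i = 0 <;> simp [h, hc]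

-- a leading dot run shifts the starts seen after a dot
theorem pvSP_dot_repl (m : Nat) (t : List Char) :
    pvSP '.' (List.replicate m '.' ++ t) = (pvSP '.' t).map (· + m) := by
  induction m with
  | zero => simp
  | succ k ih =>
    rw [List.replicate_succ, List.cons_append, pvSP_cons]
    simp only [beq_self_eq_true, Bool.not_true, Bool.and_false, ih, List.map_map]
    congr 1

theorem pvSP_run (n : Nat) (hn : 0 < n) (t : List Char) (ht : t.getD 0 ' ' ≠ '.') :
    pvSP ' ' (List.replicate n '.' ++ t) = 0 :: (pvSP ' ' t).map (· + n) := by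
  obtain ⟨m, rfl⟩ : ∃ m, n = m + 1 := ⟨n - 1, by omega⟩
  rw [List.replicate_succ, List.cons_append, pvSP_cons]
  have h1 : pvSP '.' (List.replicate m '.' ++ t) = (pvSP '.' t).map (· + m) :=
    pvSP_dot_repl m t
  have h2 : pvSP '.' t = pvSP ' ' t := by
    cases t with
    | nil => simp [pvSP]
    | cons c t' =>
      have hc : ¬ c = '.' := by simpa using ht
      rw [pvSP_cons, pvSP_cons]
      simp [hc]
  simp only [beq_self_eq_true, h1, h2, List.map_map]
  rfl

theorem pvE_run (n : Nat) (hn : 0 < n) (t : List Char) (ht : t.getD 0 ' ' ≠ '.') :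
    pvE (List.replicate n '.' ++ t) = (n - 1) :: (pvE t).map (· + n) := by
  induction n with
  | zero => omega
  | succ m ih =>
    rw [List.replicate_succ, List.cons_append, pvE_cons]
    cases m with
    | zero =>
      simp only [List.replicate_zero, List.nil_append]
      have hcond : ('.' == '.' && !(t.getD 0 ' ' == '.')) = true := by
        simp [show ¬ t[0]?.getD ' ' = '.' from ht]
      rw [if_pos hcond]
      simp
    | succ k =>
      have h0 : (List.replicate (k + 1) '.' ++ t).getD 0 ' ' = '.' := by
        simp [List.replicate_succ]
      rw [ih (by omega)]
      simp only [h0, beq_self_eq_true, Bool.not_true, Bool.and_false, List.map_cons, List.map_map]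
      congr 1

-- (R1) a non-dot head changes nothing
theorem pvR_nondot (c : Char) (hc : ¬ c = '.') (l : List Char) :
    pvR (c :: l) = pvR l := by
  unfold pvR
  rw [pvSP_cons, pvE_cons]
  simp only [beq_iff_eq, hc, Bool.and_eq_true]
  rw [if_neg (by simp), if_neg (by simp)]
  simp only [List.nil_append, pvSP_nondot c hc l]
  exact pvZ_shift 1 _ _

-- (R2) a maximal leading dot run contributes its length
theorem pvR_run (n : Nat) (hn : 0 < n) (c : Char) (hc : ¬ c = '.') (l : List Char) :
    pvR (List.replicate n '.' ++ c :: l) = (n : Int) :: pvR l := by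
  unfold pvR
  rw [pvSP_run n hn (c :: l) (by simpa using hc), pvE_run n hn (c :: l) (by simpa using hc)]
  rw [show pvZ (0 :: (pvSP ' ' (c :: l)).map (· + n)) ((n - 1) :: (pvE (c :: l)).map (· + n))
      = (((n - 1 : Nat) : Int) - 0 + 1) :: pvZ ((pvSP ' ' (c :: l)).map (· + n)) ((pvE (c :: l)).map (· + n)) from rfl]
  rw [pvZ_shift n _ _]
  have hcast : ((n - 1 : Nat) : Int) - 0 + 1 = (n : Int) := by omega
  rw [hcast]
  have h1 : pvZ (pvSP ' ' (c :: l)) (pvE (c :: l)) = pvR (c :: l) := rfl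
  rw [h1, pvR_nondot c hc l]
  rfl

-- (R3) a string of only dots
theorem pvR_replicate (n : Nat) :
    pvR (List.replicate n '.') = if 0 < n then [(n : Int)] else [] := by
  cases n with
  | zero => simp [pvR, pvSP, pvE, pvZ]
  | succ m =>
    have h : List.replicate (m + 1) '.' = List.replicate (m + 1) '.' ++ ([] : List Char) := by simp
    rw [if_pos (by omega)]
    unfold pvR
    rw [h, pvSP_run (m + 1) (by omega) [] (by simp), pvE_run (m + 1) (by omega) [] (by simp)]
    simp [pvSP, pvE, pvZ]

-- main invariant: A's loop from state (acc, curr) computes acc ++ pvR(pending dots ++ rest)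
theorem pv_main (l : List Char) : ∀ (acc : List Int) (curr : Nat),
    pvFin (l.foldl pvStep (acc, (curr : Int))) = acc ++ pvR (List.replicate curr '.' ++ l) := by
  induction l with
  | nil =>
    intro acc curr
    simp only [List.foldl_nil, List.append_nil, pvR_replicate, pvFin]
    by_cases h : 0 < curr
    · rw [if_pos (by exact_mod_cast h), if_pos h]
    · have h0 : curr = 0 := by omega
      subst h0; simp
  | cons c rest ih =>
    intro acc curr
    by_cases hc : c = '.'
    · subst hc
      rw [List.foldl_cons, show pvStep (acc, (curr : Int)) '.' = (acc, ((curr + 1 : Nat) : Int)) by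
        simp [pvStep]]
      rw [ih acc (curr + 1)]
      congr 1
      rw [List.replicate_succ']
      simp
    · by_cases h : 0 < curr
      · rw [List.foldl_cons, show pvStep (acc, (curr : Int)) c = (acc ++ [(curr : Int)], ((0 : Nat) : Int)) by
          simp only [pvStep, Nat.cast_zero]
          rw [if_neg (by simp [hc]), if_pos (by exact_mod_cast h)]]
        rw [ih (acc ++ [(curr : Int)]) 0, pvR_run curr h c hc rest]
        simp
      · have h0 : curr = 0 := by omega
        subst h0
        rw [List.foldl_cons, show pvStep (acc, ((0 : Nat) : Int)) c = (acc, ((0 : Nat) : Int)) by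
          simp [pvStep, hc]]
        rw [ih acc 0]
        simp only [List.replicate_zero, List.nil_append]
        rw [pvR_nondot c hc rest]

-- B's port equals pvR: the two in-port filters equal pvSP ' ' / pvE
theorem pv_alt_eq_pvR (l : List Char) :
    ((((List.range l.length).filter
        (fun i => l.getD i ' ' == '.' && (i == 0 || !(l.getD (i - 1) ' ' == '.')))).zip
      ((List.range l.length).filter
        (fun i => l.getD i ' ' == '.' && (i == l.length - 1 || !(l.getD (i + 1) ' ' == '.'))))).map
      (fun p => (p.2 : Int) - (p.1 : Int) + 1)) = pvR l := by
  have hs : (List.range l.length).filter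
      (fun i => l.getD i ' ' == '.' && (i == 0 || !(l.getD (i - 1) ' ' == '.'))) = pvSP ' ' l := by
    unfold pvSP
    apply List.filter_congr
    intro i _
    by_cases h : i = 0
    · simp [h]
    · rw [show (i == 0) = false from beq_eq_false_iff_ne.mpr h]
      simp [h]
  have he : (List.range l.length).filter
      (fun i => l.getD i ' ' == '.' && (i == l.length - 1 || !(l.getD (i + 1) ' ' == '.'))) = pvE l := by
    unfold pvE
    apply List.filter_congr
    intro i hi
    rw [List.mem_range] at hi
    by_cases h : i = l.length - 1
    · subst h
      have hout : l[l.length - 1 + 1]?.getD ' ' = ' ' :=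
        List.getD_eq_default _ _ (by omega)
      simp [hout]
    · rw [show (i == l.length - 1) = false from beq_eq_false_iff_ne.mpr h]
      simp
  rw [hs, he]
  rfl

-- ===== VERDICT (by name: the statement is the Claim_ definition above) =====
theorem get_loop_sizes_spec : Claim_equal_get_loop_sizes := by
  intro s _
  show get_loop_sizes s = get_loop_sizes_alt s
  have hb : get_loop_sizes_alt s = pvR s.toList := by
    unfold get_loop_sizes_alt
    exact pv_alt_eq_pvR s.toList
  have ha := pv_main s.toList [] 0
  simpa [get_loop_sizes, hb] using ha
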